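-- pv_equiv track=rewrite | github.com/cecilia-uu/LeetCode | OA/2sigma.py | find_earliest_peak_time
-- ===== SOURCE A (Python) =====
-- def find_earliest_peak_time(start, end):
--     # Create an event list with (time, type) where type is +1 for start and -1 for end
--     events = []
--     for s in start:
--         events.append((s, 1))  # +1 for start of interaction
--     for e in end:
--         events.append((e + 1, -1))  # -1 for end of interaction (end is inclusive, so add 1)
--
--     # Sort events by time; in case of tie, sort -1 before +1 to ensure correct order
--     events.sort()
--
--     max_clients = 0  # Track the maximum number of concurrent clients
--     current_clients = 0  # Track the current number of clients interacting
--     earliest_time = 0  # Track the earliest time with maximum clients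
--
--     # Iterate over sorted events
--     for time, event in events:
--         current_clients += event  # Update current concurrent clients
--
--         # Check if this is the new maximum
--         if current_clients > max_clients:
--             max_clients = current_clients
--             earliest_time = time
--
--     return earliest_time
-- ===== SOURCE B (Python) =====
-- def find_earliest_peak_time(start, end):
--     # Two-pointer merge over separately sorted start times and shifted end times.
--     ss = sorted(start)
--     es = sorted(e + 1 for e in end)
--     i = j = 0
--     cur = best = earliest = 0
--     while i < len(ss) or j < len(es):
--         if j < len(es) and (i == len(ss) or es[j] <= ss[i]):
--             cur -= 1
--             j += 1
--         else:
--             cur += 1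
--             if cur > best:
--                 best = cur
--                 earliest = ss[i]
--             i += 1
--     return earliest
-- ===== Notes on version B (the rewrite author's own statement) =====
-- stated objective: alternative
-- what changed: Replaces A's single combined (time, type) event list sorted by tuple comparison with a two-pointer merge walking the separately sorted start list and shifted end list, maintaining the concurrency counter directly during the merge.
import Mathlib
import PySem

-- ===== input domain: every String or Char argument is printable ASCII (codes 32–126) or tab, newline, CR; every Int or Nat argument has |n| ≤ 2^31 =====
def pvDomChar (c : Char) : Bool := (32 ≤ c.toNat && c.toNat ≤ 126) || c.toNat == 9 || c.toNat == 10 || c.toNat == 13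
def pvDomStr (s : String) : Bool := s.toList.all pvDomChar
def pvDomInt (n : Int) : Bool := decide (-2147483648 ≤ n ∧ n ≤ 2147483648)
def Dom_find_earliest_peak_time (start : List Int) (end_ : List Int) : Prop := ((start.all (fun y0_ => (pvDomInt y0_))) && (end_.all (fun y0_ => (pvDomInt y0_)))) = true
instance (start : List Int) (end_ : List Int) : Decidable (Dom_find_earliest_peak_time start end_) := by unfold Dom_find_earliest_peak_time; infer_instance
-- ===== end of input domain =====

-- B replaces A's single combined sorted event list by a two-pointer merge of the
-- separately sorted start list and shifted end list (objective: alternative decomposition).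

-- ===== PORT A =====
def find_earliest_peak_time (start : List Int) (end_ : List Int) : Int :=
  let events : List (Int × Int) := start.foldl (fun acc s => acc ++ [(s, (1 : Int))]) []
  let events := end_.foldl (fun acc e => acc ++ [(e + 1, (-1 : Int))]) events
  let events := PySem.List.sorted2 events (fun p => p.1) (fun p => p.2) false
  let st := events.foldl
    (fun (st : Int × Int × Int) tv =>
      let cur := st.2.1 + tv.2
      if cur > st.1 then (cur, cur, tv.1) else (st.1, cur, st.2.2))
    (0, 0, 0)
  st.2.2

-- ===== PORT B =====
-- the while loop of Source B, on the two remaining suffixes; state (cur, best, earliest)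
def bMerge : List Int → List Int → Int → Int → Int → Int
  | [], [], _, _, t => t
  | [], _ :: es, cur, best, t => bMerge [] es (cur - 1) best t
  | s :: ss, [], cur, best, t =>
      let cur' := cur + 1
      if cur' > best then bMerge ss [] cur' cur' s else bMerge ss [] cur' best t
  | s :: ss, e :: es, cur, best, t =>
      if e ≤ s then bMerge (s :: ss) es (cur - 1) best t
      else
        let cur' := cur + 1
        if cur' > best then bMerge ss (e :: es) cur' cur' s
        else bMerge ss (e :: es) cur' best t
  termination_by ss es _ _ _ => ss.length + es.length

def find_earliest_peak_time_alt (start : List Int) (end_ : List Int) : Int :=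
  bMerge (PySem.List.sorted start (fun x => x) false)
         (PySem.List.sorted (end_.map (fun e => e + 1)) (fun x => x) false) 0 0 0

-- ===== PRECONDITION & SPEC =====
def Spec_find_earliest_peak_time (start : List Int) (end_ : List Int) (out : Int) : Prop := out = find_earliest_peak_time_alt start end_
instance (start : List Int) (end_ : List Int) (out : Int) : Decidable (Spec_find_earliest_peak_time start end_ out) := by unfold Spec_find_earliest_peak_time; infer_instance

-- ===== CLAIM (what is proved, stated in full; the proofs are below) =====
def Claim_equal_find_earliest_peak_time : Prop := ∀ (start : List Int) (end_ : List Int), Dom_find_earliest_peak_time start end_ → Spec_find_earliest_peak_time start end_ (find_earliest_peak_time start end_)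

-- ===== LEMMAS AND PROOFS =====

-- A's loop body as a step function (for reasoning about the foldl)
def aStep (st : Int × Int × Int) (tv : Int × Int) : Int × Int × Int :=
  let cur := st.2.1 + tv.2
  if cur > st.1 then (cur, cur, tv.1) else (st.1, cur, st.2.2)

-- the sequence of (time, ±1) events B's merge processes
def mseq : List Int → List Int → List (Int × Int)
  | [], [] => []
  | [], e :: es => (e, -1) :: mseq [] es
  | s :: ss, [] => (s, 1) :: mseq ss []
  | s :: ss, e :: es =>
      if e ≤ s then (e, -1) :: mseq (s :: ss) es
      else (s, 1) :: mseq ss (e :: es)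
  termination_by ss es => ss.length + es.length

lemma bMerge_eq_fold : ∀ ss es cur best t, cur ≤ best →
    bMerge ss es cur best t = ((mseq ss es).foldl aStep (best, cur, t)).2.2
  | [], [], cur, best, t, _ => by simp [bMerge, mseq]
  | [], e :: es, cur, best, t, h => by
      rw [bMerge, mseq, List.foldl_cons]
      have : aStep (best, cur, t) (e, -1) = (best, cur - 1, t) := by
        simp only [aStep]; rw [if_neg (by omega), sub_eq_add_neg]
      rw [this, bMerge_eq_fold [] es _ _ _ (by omega)]
  | s :: ss, [], cur, best, t, h => by
      rw [bMerge, mseq, List.foldl_cons]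
      by_cases hc : cur + 1 > best
      · have : aStep (best, cur, t) (s, 1) = (cur + 1, cur + 1, s) := by
          simp only [aStep]; rw [if_pos (by omega)]
        rw [this]
        simp only [hc, if_pos]
        exact bMerge_eq_fold ss [] _ _ _ (by omega)
      · have : aStep (best, cur, t) (s, 1) = (best, cur + 1, t) := by
          simp only [aStep]; rw [if_neg (by omega)]
        rw [this]
        simp only [hc]
        exact bMerge_eq_fold ss [] _ _ _ (by omega)
  | s :: ss, e :: es, cur, best, t, h => by
      rw [bMerge, mseq]
      by_cases he : e ≤ s
      · rw [if_pos he, if_pos he, List.foldl_cons]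
        have : aStep (best, cur, t) (e, -1) = (best, cur - 1, t) := by
          simp only [aStep]; rw [if_neg (by omega), sub_eq_add_neg]
        rw [this, bMerge_eq_fold (s :: ss) es _ _ _ (by omega)]
      · rw [if_neg he, if_neg he, List.foldl_cons]
        by_cases hc : cur + 1 > best
        · have : aStep (best, cur, t) (s, 1) = (cur + 1, cur + 1, s) := by
            simp only [aStep]; rw [if_pos (by omega)]
          rw [this]
          simp only [hc, if_pos]
          exact bMerge_eq_fold ss (e :: es) _ _ _ (by omega)
        · have : aStep (best, cur, t) (s, 1) = (best, cur + 1, t) := by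
            simp only [aStep]; rw [if_neg (by omega)]
          rw [this]
          simp only [hc]
          exact bMerge_eq_fold ss (e :: es) _ _ _ (by omega)
  termination_by ss es _ _ _ _ => ss.length + es.length

lemma mseq_perm : ∀ ss es : List Int, (mseq ss es).Perm
    (ss.map (fun s => (s, (1 : Int))) ++ es.map (fun e => (e, (-1 : Int))))
  | [], [] => by simp [mseq]
  | [], e :: es => by
      rw [mseq]
      simpa using (mseq_perm [] es).cons (e, -1)
  | s :: ss, [] => by
      rw [mseq]
      simpa using (mseq_perm ss []).cons (s, 1)
  | s :: ss, e :: es => by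
      rw [mseq]
      by_cases he : e ≤ s
      · rw [if_pos he]
        refine ((mseq_perm (s :: ss) es).cons (e, -1)).trans ?_
        exact (List.perm_middle (a := (e, (-1 : Int)))
          (l₁ := (s, (1:Int)) :: ss.map (fun s => (s, (1:Int))))
          (l₂ := es.map (fun e => (e, (-1:Int))))).symm
      · rw [if_neg he]
        simpa using (mseq_perm ss (e :: es)).cons (s, 1)
  termination_by ss es => ss.length + es.length

lemma mem_mseq_fst {ss es : List Int} {x : Int × Int} (hx : x ∈ mseq ss es) :
    (x.1 ∈ ss ∧ x.2 = 1) ∨ (x.1 ∈ es ∧ x.2 = -1) := by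
  have := (mseq_perm ss es).mem_iff.mp hx
  rcases List.mem_append.mp this with h | h <;>
    rcases List.mem_map.mp h with ⟨y, hy, rfl⟩ <;> simp_all

lemma mseq_pairwise : ∀ ss es : List Int,
    ss.Pairwise (· ≤ ·) → es.Pairwise (· ≤ ·) →
    (mseq ss es).Pairwise (fun a b => toLex a ≤ toLex b)
  | [], [], _, _ => by simp [mseq]
  | [], e :: es, _, hes => by
      rw [mseq, List.pairwise_cons]
      rw [List.pairwise_cons] at hes
      refine ⟨?_, mseq_pairwise [] es (by simp) hes.2⟩
      intro x hx
      rcases mem_mseq_fst hx with ⟨h1, _⟩ | ⟨h1, h2⟩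
      · simp at h1
      · have := hes.1 _ h1
        rw [Prod.Lex.toLex_le_toLex]; simp only [h2]; omega
  | s :: ss, [], hss, _ => by
      rw [mseq, List.pairwise_cons]
      rw [List.pairwise_cons] at hss
      refine ⟨?_, mseq_pairwise ss [] hss.2 (by simp)⟩
      intro x hx
      rcases mem_mseq_fst hx with ⟨h1, h2⟩ | ⟨h1, _⟩
      · have := hss.1 _ h1
        rw [Prod.Lex.toLex_le_toLex]; simp only [h2]; omega
      · simp at h1
  | s :: ss, e :: es, hss, hes => by
      rw [mseq]
      by_cases he : e ≤ s
      · rw [if_pos he, List.pairwise_cons]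
        rw [List.pairwise_cons] at hes
        refine ⟨?_, mseq_pairwise (s :: ss) es hss hes.2⟩
        intro x hx
        rcases mem_mseq_fst hx with ⟨h1, h2⟩ | ⟨h1, h2⟩
        · have : s ≤ x.1 := by
            rcases List.mem_cons.mp h1 with hmem | hmem
            · omega
            · exact (List.pairwise_cons.mp hss).1 _ hmem
          rw [Prod.Lex.toLex_le_toLex]; simp only [h2]; omega
        · have := hes.1 _ h1
          rw [Prod.Lex.toLex_le_toLex]; simp only [h2]; omega
      · rw [if_neg he, List.pairwise_cons]
        rw [List.pairwise_cons] at hss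
        refine ⟨?_, mseq_pairwise ss (e :: es) hss.2 hes⟩
        intro x hx
        rcases mem_mseq_fst hx with ⟨h1, h2⟩ | ⟨h1, h2⟩
        · have := hss.1 _ h1
          rw [Prod.Lex.toLex_le_toLex]; simp only [h2]; omega
        · have : e ≤ x.1 := by
            rcases List.mem_cons.mp h1 with hmem | hmem
            · omega
            · exact (List.pairwise_cons.mp hes).1 _ hmem
          rw [Prod.Lex.toLex_le_toLex]; simp only [h2]; omega
  termination_by ss es _ _ => ss.length + es.length

-- Python's tuple sort of (time, type) pairs is the sort keyed by the lexicographic order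
lemma sorted2_eq_sorted_lex (xs : List (Int × Int)) :
    PySem.List.sorted2 xs (fun p => p.1) (fun p => p.2) false
      = PySem.List.sorted xs (fun p => toLex p) false := by
  have hb : (fun (a b : Int × Int) =>
        decide (a.1 < b.1) || (!decide (b.1 < a.1) && decide (a.2 < b.2)))
      = (fun (a b : Int × Int) => decide (toLex a < toLex b)) := by
    funext a b
    by_cases h1 : a.1 < b.1 <;> by_cases h2 : b.1 < a.1 <;> by_cases h3 : a.2 < b.2 <;>
      simp [h1, h2, h3, Prod.Lex.toLex_lt_toLex] <;> omega
  unfold PySem.List.sorted2 PySem.List.sorted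
  simp only [Bool.false_eq_true, if_false]
  rw [hb]

-- the merged sequence IS the sorted event list
lemma sorted_events_eq (start end_ : List Int) :
    PySem.List.sorted
      (start.map (fun s => (s, (1 : Int))) ++ end_.map (fun e => (e + 1, (-1 : Int))))
      (fun p => toLex p) false
    = mseq (PySem.List.sorted start (fun x => x) false)
          (PySem.List.sorted (end_.map (fun e => e + 1)) (fun x => x) false) := by
  set ss := PySem.List.sorted start (fun x => x) false with hss
  set es := PySem.List.sorted (end_.map (fun e => e + 1)) (fun x => x) false with hes
  apply PySem.List.eq_of_perm_of_pairwise_le_of_injective (fun p => toLex p)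
    (fun a b h => by simpa using h)
  · have hstep : (ss.map (fun s => (s, (1 : Int))) ++ es.map (fun e => (e, (-1 : Int)))).Perm
        (start.map (fun s => (s, (1 : Int))) ++ end_.map (fun e => (e + 1, (-1 : Int)))) := by
      refine List.Perm.append ((PySem.List.sorted_perm start (fun x => x) false).map _) ?_
      have hmm : (end_.map (fun e => e + 1)).map (fun e => (e, (-1 : Int)))
          = end_.map (fun e => (e + 1, (-1 : Int))) := by
        simp [List.map_map, Function.comp]
      exact hmm ▸ ((PySem.List.sorted_perm (end_.map (fun e => e + 1)) (fun x => x) false).map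
        (fun e => (e, (-1 : Int))))
    exact (PySem.List.sorted_perm _ _ _).trans ((mseq_perm ss es).trans hstep).symm
  · exact PySem.List.sorted_pairwise _ _
  · exact mseq_pairwise ss es
      (by simpa using PySem.List.sorted_pairwise start (fun x => x))
      (by simpa using PySem.List.sorted_pairwise (end_.map (fun e => e + 1)) (fun x => x))

-- ===== VERDICT (by name: the statement is the Claim_ definition above) =====
theorem find_earliest_peak_time_spec : Claim_equal_find_earliest_peak_time := by
  intro start end_ _
  show find_earliest_peak_time start end_ = find_earliest_peak_time_alt start end_
  unfold find_earliest_peak_time find_earliest_peak_time_alt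
  rw [bMerge_eq_fold _ _ _ _ _ le_rfl]
  simp only [PySem.List.foldl_append_singleton_eq_map, List.nil_append]
  rw [sorted2_eq_sorted_lex, sorted_events_eq]
  rfl
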